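-- pv_equiv track=rewrite | github.com/ComplianceAsCode/content | utils/compare_results.py | flatten_stig_results
-- ===== SOURCE A (Python) =====
-- class Status:
--     PASS = "pass"
--     FAIL = "fail"
--     ERROR = "error"
--     NOT_CHECKED = "notchecked"
--     NOT_SELECTED = "notselected"
--     NOT_APPLICABLE = "notapplicable"
--     INFORMATION = "informational"
--
--     @classmethod
--     def get_wining_status(cls, current_status: str, proposed: str) -> str:
--         if current_status == cls.ERROR:
--             return current_status
--         elif current_status == cls.FAIL:
--             return current_status
--         elif current_status == cls.NOT_APPLICABLE:
--             return current_status
--         elif current_status == cls.NOT_SELECTED: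
--             return current_status
--         elif current_status == cls.NOT_CHECKED:
--             return current_status
--         elif current_status == cls.INFORMATION:
--             return current_status
--         return proposed
--
-- def flatten_stig_results(stig_results: dict) -> dict:
--     base_stig_flat_results = dict()
--     for stig, results in stig_results.items():
--         if len(results) == 1:
--             base_stig_flat_results[stig] = results[0]
--         status = results[0]
--         for result in results:
--             if result == status:
--                 continue
--             else:
--                 status = Status.get_wining_status(status, result)
--         base_stig_flat_results[stig] = status
--     return base_stig_flat_results
-- ===== SOURCE B (Python) =====
-- _TERMINAL = frozenset({"error", "fail", "notapplicable", "notselected",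
--                        "notchecked", "informational"})
--
--
-- def flatten_stig_results(stig_results: dict) -> dict:
--     # winner = first terminal status in the list, else the last status
--     return {stig: next((r for r in results if r in _TERMINAL), results[-1])
--             for stig, results in stig_results.items()}
-- ===== Notes on version B (the rewrite author's own statement) =====
-- stated objective: simpler
-- what changed: Replaces the skip-if-equal fold through the elif-cascade 'winning status' helper (and the redundant len==1 pre-insert) with a direct find-first-terminal-status-else-last lookup over a membership set, built as a dict comprehension.
-- outside the precondition, e.g. on flatten_stig_results({'s': []}): A raises IndexError, B raises IndexError
import Mathlib
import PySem

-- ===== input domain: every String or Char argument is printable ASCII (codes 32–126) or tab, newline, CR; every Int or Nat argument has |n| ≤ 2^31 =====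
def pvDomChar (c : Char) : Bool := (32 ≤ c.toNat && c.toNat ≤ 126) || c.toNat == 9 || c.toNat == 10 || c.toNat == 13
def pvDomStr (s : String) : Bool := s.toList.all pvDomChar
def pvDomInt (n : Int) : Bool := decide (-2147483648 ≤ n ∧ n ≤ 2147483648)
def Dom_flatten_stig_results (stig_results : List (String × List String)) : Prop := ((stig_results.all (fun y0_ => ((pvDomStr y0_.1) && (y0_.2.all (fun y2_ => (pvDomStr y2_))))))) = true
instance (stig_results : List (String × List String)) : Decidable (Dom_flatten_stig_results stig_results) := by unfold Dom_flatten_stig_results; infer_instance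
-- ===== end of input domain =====

-- B replaces A's per-status fold with the elif-cascade helper by a find-first-terminal-else-last
-- lookup over a membership set (objective: simpler). Return-value equivalence only.

-- ===== PORT A =====
-- Status.get_wining_status: the elif cascade
def get_wining_status (current_status : String) (proposed : String) : String :=
  if current_status == "error" then current_status
  else if current_status == "fail" then current_status
  else if current_status == "notapplicable" then current_status
  else if current_status == "notselected" then current_status
  else if current_status == "notchecked" then current_status
  else if current_status == "informational" then current_status
  else proposed

def flatten_stig_results (stig_results : List (String × List String)) : List (String × String) :=
  (stig_results.foldl
    (fun (base : PySem.Dict String String) p =>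
      let stig := p.1
      let results := p.2
      let base :=
        if results.length == 1 then base.insert stig (PySem.List.pyGetD results 0 "") else base
      let status := results.foldl
        (fun status result =>
          if result == status then status else get_wining_status status result)
        (PySem.List.pyGetD results 0 "")
      base.insert stig status)
    PySem.Dict.empty).items

-- ===== PORT B =====
def pvTerminal : List String :=
  ["error", "fail", "notapplicable", "notselected", "notchecked", "informational"]

def pvWinner (results : List String) : String :=
  match results.find? (fun r => pvTerminal.contains r) with
  | some r => r
  | none => PySem.List.pyGetD results (-1) ""

def flatten_stig_results_alt (stig_results : List (String × List String)) : List (String × String) :=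
  stig_results.map (fun p => (p.1, pvWinner p.2))

-- ===== PRECONDITION & SPEC =====
-- Pre_ excludes empty result lists (Python A raises IndexError on results[0]) and duplicate
-- stig keys (the Python parameter is a dict, which cannot hold them).
def Pre_flatten_stig_results (stig_results : List (String × List String)) : Prop :=
  (stig_results.map (·.1)).Nodup ∧ ∀ p ∈ stig_results, p.2 ≠ []
instance (stig_results : List (String × List String)) : Decidable (Pre_flatten_stig_results stig_results) := by unfold Pre_flatten_stig_results; infer_instance
def pvWitness_flatten_stig_results : (List (String × List String)) :=
  [("stig1", ["pass", "fail", "pass"]), ("stig2", ["pass"])]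

def Spec_flatten_stig_results (stig_results : List (String × List String)) (out : List (String × String)) : Prop := out = flatten_stig_results_alt stig_results
instance (stig_results : List (String × List String)) (out : List (String × String)) : Decidable (Spec_flatten_stig_results stig_results out) := by unfold Spec_flatten_stig_results; infer_instance

-- ===== CLAIM (what is proved, stated in full; the proofs are below) =====
def Claim_equal_flatten_stig_results : Prop := ∀ (stig_results : List (String × List String)), Dom_flatten_stig_results stig_results → Pre_flatten_stig_results stig_results → Spec_flatten_stig_results stig_results (flatten_stig_results stig_results)

-- ===== LEMMAS AND PROOFS =====

-- A's loop body (skip-if-equal + elif cascade) is "keep a terminal status, else take the new one"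
theorem step_eq (st r : String) :
    (if r == st then st else get_wining_status st r) =
      (if pvTerminal.contains st then st else r) := by
  simp only [get_wining_status, pvTerminal, List.contains_cons, List.contains_nil]
  by_cases h : r = st <;> split_ifs <;> simp_all

theorem pyGetD_cons_zero (x : String) (rs : List String) (d : String) :
    PySem.List.pyGetD (x :: rs) 0 d = x := by
  simp [pysem]

theorem pyGetD_cons_neg_one (x : String) (rs : List String) (d : String) :
    PySem.List.pyGetD (x :: rs) (-1) d = rs.getLastD x := by
  simp only [Int.reduceNeg, List.length_cons, PySem.List.pyGetD_neg_ofNat, Order.lt_one_iff,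
    le_add_iff_nonneg_left, zero_le, add_tsub_cancel_right]
  induction rs generalizing x with
  | nil => rfl
  | cons y ys ih => rw [List.getLastD_cons]; simpa using ih y

-- the fold once the step is rewritten: first terminal wins, else the last element
theorem foldl_keep (xs : List String) (init : String) :
    xs.foldl (fun st r => if pvTerminal.contains st then st else r) init =
      if pvTerminal.contains init then init
      else ((xs.find? (fun r => pvTerminal.contains r)).getD (xs.getLastD init)) := by
  induction xs generalizing init with
  | nil => rw [List.foldl_nil, List.find?_nil, List.getLastD_nil, Option.getD_none, ite_self]
  | cons y ys ih =>
    rw [List.foldl_cons]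
    by_cases h : pvTerminal.contains init
    · rw [if_pos h, ih, if_pos h, if_pos h]
    · rw [if_neg h, ih, if_neg h, List.find?_cons, List.getLastD_cons]
      by_cases hy : y ∈ pvTerminal
      · simp [hy]
      · simp [hy]

-- A's per-list fold computes B's winner, for every list
theorem status_eq_winner (results : List String) :
    results.foldl
        (fun status result =>
          if result == status then status else get_wining_status status result)
        (PySem.List.pyGetD results 0 "") = pvWinner results := by
  have hstep : (fun (status result : String) =>
      if result == status then status else get_wining_status status result) =
      (fun st r => if pvTerminal.contains st then st else r) := by
    funext st r; exact step_eq st r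
  rw [hstep]
  cases results with
  | nil => simp [pvWinner, pysem]
  | cons x rs =>
    rw [pyGetD_cons_zero, List.foldl_cons, ite_self, foldl_keep]
    by_cases h : x ∈ pvTerminal
    · simp [pvWinner, h]
    · simp only [pvWinner, List.find?_cons]
      cases hf : List.find? (fun r => pvTerminal.contains r) rs <;>
        simp [pyGetD_cons_neg_one, h]

-- ===== VERDICT (by name: the statement is the Claim_ definition above) =====
theorem flatten_stig_results_spec : Claim_equal_flatten_stig_results := by
  intro stig_results _ hpre
  unfold Spec_flatten_stig_results flatten_stig_results flatten_stig_results_alt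
  have hbody : (fun (base : PySem.Dict String String) (p : String × List String) =>
      let stig := p.1
      let results := p.2
      let base :=
        if results.length == 1 then base.insert stig (PySem.List.pyGetD results 0 "") else base
      let status := results.foldl
        (fun status result =>
          if result == status then status else get_wining_status status result)
        (PySem.List.pyGetD results 0 "")
      base.insert stig status) =
      (fun (base : PySem.Dict String String) (p : String × List String) =>
        base.insert p.1 (pvWinner p.2)) := by
    funext base p
    simp only [status_eq_winner]
    split
    · rw [PySem.Dict.insert_insert_self]
    · rfl
  rw [hbody]
  rw [PySem.Dict.items_foldl_insert_fresh stig_results (fun p => p.1) (fun p => pvWinner p.2)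
    PySem.Dict.empty (by intro a _; simp) hpre.1]
  simp [PySem.Dict.empty]
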